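-- pv_equiv track=rewrite | github.com/dvalinotti/python-practice-problems | add_to_digits.py | add_to_digits
-- ===== SOURCE A (Python) =====
-- import math
--
-- def add_to_digits( num ):
--     digits = int(math.log10(num)) + 1
--     result = num
--     for i in range(digits):
--         if i == 0:
--             result += 1
--         else:
--             result += 10**i
--     return result
-- ===== SOURCE B (Python) =====
-- import math
--
-- def add_to_digits(num):
--     digits = int(math.log10(num)) + 1
--     # repunit 1 + 10 + ... + 10**(digits-1) in closed form
--     return num + (10 ** digits - 1) // 9
-- ===== Notes on version B (the rewrite author's own statement) =====
-- stated objective: simpler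
-- what changed: The loop accumulating 1 + 10 + ... + 10**(digits-1) is replaced by the closed-form repunit (10**digits - 1)//9 added in one expression; the log10 digit count is kept verbatim.
import Mathlib
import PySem

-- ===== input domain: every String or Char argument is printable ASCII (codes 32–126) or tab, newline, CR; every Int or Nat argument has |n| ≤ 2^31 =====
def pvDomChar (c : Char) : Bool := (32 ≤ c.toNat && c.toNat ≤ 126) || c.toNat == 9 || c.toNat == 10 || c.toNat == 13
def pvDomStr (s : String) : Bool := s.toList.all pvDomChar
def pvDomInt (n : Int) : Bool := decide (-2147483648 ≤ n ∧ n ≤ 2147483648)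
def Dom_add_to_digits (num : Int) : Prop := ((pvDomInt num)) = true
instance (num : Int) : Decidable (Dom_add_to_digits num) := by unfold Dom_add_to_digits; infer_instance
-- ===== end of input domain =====

-- B replaces A's digit-summing loop with the closed-form repunit (10^digits - 1)//9 (simpler, one expression).


-- Shared helper (the line `digits = int(math.log10(num)) + 1`, identical in A and B).
-- Hand port of a float construct PySem does not cover: for every 1 ≤ num ≤ 2^31 (the whole
-- admitted domain), int(math.log10(num)) + 1 is exactly the decimal digit count of num,
-- which we compute as len(str(num)); this is exact on the stated domain (checked numerically).
def pyLog10Digits (num : Int) : Int := PySem.Str.len (PySem.Int.toStr num)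

-- ===== PORT A =====
def add_to_digits (num : Int) : Int :=
  let digits := pyLog10Digits num
  let result := num
  (PySem.List.pyRange 0 digits 1).foldl
    (fun result i => if i = 0 then result + 1 else result + 10 ^ i.toNat) result

-- ===== PORT B =====
def add_to_digits_alt (num : Int) : Int :=
  let digits := pyLog10Digits num
  num + PySem.Int.floordiv (10 ^ digits.toNat - 1) 9

-- ===== PRECONDITION & SPEC =====
-- math.log10 raises ValueError on num <= 0, in both A and B.
def Pre_add_to_digits (num : Int) : Prop := 0 < num
instance (num : Int) : Decidable (Pre_add_to_digits num) := by unfold Pre_add_to_digits; infer_instance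
def pvWitness_add_to_digits : Int := (5)

def Spec_add_to_digits (num : Int) (out : Int) : Prop := out = add_to_digits_alt num
instance (num : Int) (out : Int) : Decidable (Spec_add_to_digits num out) := by unfold Spec_add_to_digits; infer_instance

-- ===== CLAIM (what is proved, stated in full; the proofs are below) =====
def Claim_equal_add_to_digits : Prop := ∀ (num : Int), Dom_add_to_digits num → Pre_add_to_digits num → Spec_add_to_digits num (add_to_digits num)

-- ===== LEMMAS AND PROOFS =====

-- geometric (repunit) sum
def repunit (d : Nat) : Int := ∑ i ∈ Finset.range d, (10 : Int) ^ i

theorem nine_mul_repunit (d : Nat) : 9 * repunit d = 10 ^ d - 1 := by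
  induction d with
  | zero => simp [repunit]
  | succ n ih =>
    simp only [repunit, Finset.sum_range_succ] at *
    rw [mul_add, ih]
    ring

theorem loop_eq_repunit (a : Int) (d : Nat) :
    (PySem.List.pyRange 0 (d : Int) 1).foldl
      (fun result i => if i = 0 then result + 1 else result + 10 ^ i.toNat) a
      = a + repunit d := by
  induction d generalizing a with
  | zero => simp [repunit]
  | succ n ih =>
    have h1 : ((n + 1 : Nat) : Int) = (n : Int) + 1 := by push_cast; ring
    rw [h1, PySem.List.pyRange_one_succ_right (by positivity), List.foldl_append, ih]
    simp only [List.foldl_cons, List.foldl_nil, repunit, Finset.sum_range_succ]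
    by_cases hn : (n : Int) = 0
    · have : n = 0 := by exact_mod_cast hn
      subst this; simp
    · rw [if_neg hn]
      have : ((n : Int)).toNat = n := Int.toNat_natCast n
      rw [this]; ring

theorem repunit_eq_floordiv (d : Nat) :
    PySem.Int.floordiv (10 ^ d - 1) 9 = repunit d := by
  rw [PySem.Int.floordiv_eq_ediv_of_pos (by norm_num : (0:Int) < 9), ← nine_mul_repunit d]
  exact Int.mul_ediv_cancel_left _ (by norm_num)

-- ===== VERDICT (by name: the statement is the Claim_ definition above) =====
theorem add_to_digits_spec : Claim_equal_add_to_digits := by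
  intro num _ _
  unfold Spec_add_to_digits add_to_digits add_to_digits_alt
  simp only
  set s := pyLog10Digits num with hs
  have hnn : 0 ≤ s := by
    rw [hs]; unfold pyLog10Digits
    simp [PySem.Str.len_eq]
  obtain ⟨d, hd⟩ : ∃ d : Nat, s = (d : Int) := ⟨s.toNat, (Int.toNat_of_nonneg hnn).symm⟩
  rw [hd]
  rw [loop_eq_repunit]
  rw [Int.toNat_natCast, repunit_eq_floordiv]
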